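-- pv_equiv track=rewrite | github.com/jjups96/Queens | ReinasV5.py | make_gready
-- ===== SOURCE A (Python) =====
-- def get_h_cost(board):
--   h = 0
--   for i in range(len(board)):
--     #Checa Columna
--     for j in range(i + 1,len(board)):
--       #Checa renglon
--       if board[i] == board[j]:
--         h += 1
--       #Diferencia entre actual y checada
--       offset = j - i
--       #Checa diagonales
--       if board[i] == board[j] - offset or board[i] == board[j] + offset:
--         h += 1
--
--   return h
--
-- def make_gready(board):
--   h_to_beat = get_h_cost(board)
--   for col in range(len(board)):
--     for row in range(len(board)):
--       if board[col] == row: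
--         #No evaluamos el actual
--         continue
--
--       board_copy = list(board)
--       #Mover a nuevo renglon
--       board_copy[col] = row
--       new_h_cost = get_h_cost(board_copy)
--
--       #Hacer mejor primer movimiento
--       if new_h_cost < h_to_beat:
--         board[col] = row
--         return board
-- ===== SOURCE B (Python) =====
-- def conflicts(board, col, x):
--     # number of conflicts a queen in column col at row x has with all other queens
--     c = 0
--     for j in range(len(board)):
--         if j == col:
--             continue
--         u = board[j]
--         if u == x:
--             c += 1
--         d = abs(j - col)
--         if abs(u - x) == d:
--             c += 1
--     return c
--
--
-- def make_gready(board):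
--     # First move (col, row) whose per-column conflict count strictly drops; mutates
--     # board in place like the original. Moving one queen changes the total h-cost by
--     # conflicts(col, new_row) - conflicts(col, old_row), so no full recount is needed.
--     for col in range(len(board)):
--         cur = board[col]
--         base = conflicts(board, col, cur)
--         for row in range(len(board)):
--             if cur == row:
--                 continue
--             if conflicts(board, col, row) < base:
--                 board[col] = row
--                 return board
-- ===== Notes on version B (the rewrite author's own statement) =====
-- stated objective: faster
-- what changed: Instead of copying the board and recounting all O(n^2) pairs for every candidate move, B derives the cost change of a move from a per-column conflict count (conflicts(col,row) vs conflicts(col,current)), computed in O(n) per candidate, never building a board copy or a full h-cost.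
import Mathlib
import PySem

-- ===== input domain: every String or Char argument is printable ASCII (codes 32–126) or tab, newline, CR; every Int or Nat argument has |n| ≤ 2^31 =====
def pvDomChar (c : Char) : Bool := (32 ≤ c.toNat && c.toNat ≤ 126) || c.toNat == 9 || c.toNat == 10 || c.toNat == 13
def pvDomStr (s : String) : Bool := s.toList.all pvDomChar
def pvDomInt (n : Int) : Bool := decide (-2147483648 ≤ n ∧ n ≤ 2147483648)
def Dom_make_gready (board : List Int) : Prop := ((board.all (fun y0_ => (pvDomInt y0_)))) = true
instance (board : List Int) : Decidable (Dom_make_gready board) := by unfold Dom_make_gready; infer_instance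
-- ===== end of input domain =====

-- B replaces A's per-move board copy + full O(n^2) pair recount by a per-column conflict
-- count (O(n) per candidate move); both A and B mutate `board` in place on success in
-- Python — the equivalence proved here is about the RETURN value (which coincides with
-- the mutated board in both).

-- ===== PORT A =====
def get_h_cost (board : List Int) : Int :=
  (PySem.List.pyRange 0 (PySem.List.len board) 1).foldl (fun h i =>
    (PySem.List.pyRange (i + 1) (PySem.List.len board) 1).foldl (fun h j =>
      let bi := PySem.List.pyGetD board i 0
      let bj := PySem.List.pyGetD board j 0
      let h1 := if bi == bj then h + 1 else h
      let offset := j - i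
      if bi == bj - offset || bi == bj + offset then h1 + 1 else h1) h) 0

-- inner `for row in range(len(board))` loop of A, with early return
def make_gready_rows (board : List Int) (h_to_beat : Int) (col : Int) :
    List Int → Option (List Int)
  | [] => none
  | row :: rows =>
    if PySem.List.pyGetD board col 0 == row then make_gready_rows board h_to_beat col rows
    else
      let board_copy := PySem.List.pySetD board col row
      let new_h_cost := get_h_cost board_copy
      if new_h_cost < h_to_beat then some board_copy
      else make_gready_rows board h_to_beat col rows

-- outer `for col in range(len(board))` loop of A
def make_gready_cols (board : List Int) (h_to_beat : Int) :
    List Int → Option (List Int)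
  | [] => none
  | col :: cols =>
    match make_gready_rows board h_to_beat col
        (PySem.List.pyRange 0 (PySem.List.len board) 1) with
    | some r => some r
    | none => make_gready_cols board h_to_beat cols

def make_gready (board : List Int) : Option (List Int) :=
  let h_to_beat := get_h_cost board
  make_gready_cols board h_to_beat (PySem.List.pyRange 0 (PySem.List.len board) 1)

-- ===== PORT B =====
-- B helper: conflicts of a queen in column `col` placed at row `x` with all other queens
def conflicts (board : List Int) (col : Int) (x : Int) : Int :=
  (PySem.List.pyRange 0 (PySem.List.len board) 1).foldl (fun c j =>
    if j == col then c
    else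
      let u := PySem.List.pyGetD board j 0
      let c1 := if u == x then c + 1 else c
      let d := |j - col|          -- Python abs() on ints
      if |u - x| == d then c1 + 1 else c1) 0

def make_gready_alt_rows (board : List Int) (col : Int) (cur : Int) (base : Int) :
    List Int → Option (List Int)
  | [] => none
  | row :: rows =>
    if cur == row then make_gready_alt_rows board col cur base rows
    else if conflicts board col row < base then some (PySem.List.pySetD board col row)
    else make_gready_alt_rows board col cur base rows

def make_gready_alt_cols (board : List Int) : List Int → Option (List Int)
  | [] => none
  | col :: cols =>
    let cur := PySem.List.pyGetD board col 0
    let base := conflicts board col cur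
    match make_gready_alt_rows board col cur base
        (PySem.List.pyRange 0 (PySem.List.len board) 1) with
    | some r => some r
    | none => make_gready_alt_cols board cols

def make_gready_alt (board : List Int) : Option (List Int) :=
  make_gready_alt_cols board (PySem.List.pyRange 0 (PySem.List.len board) 1)

-- ===== PRECONDITION & SPEC =====
def Spec_make_gready (board : List Int) (out : Option (List Int)) : Prop := out = make_gready_alt board
instance (board : List Int) (out : Option (List Int)) : Decidable (Spec_make_gready board out) := by unfold Spec_make_gready; infer_instance

-- ===== CLAIM (what is proved, stated in full; the proofs are below) =====
def Claim_equal_make_gready : Prop := ∀ (board : List Int), Dom_make_gready board → Spec_make_gready board (make_gready board)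

-- ===== LEMMAS AND PROOFS =====

-- conflict contribution of two queens at horizontal distance d (d ≥ 1 at all use sites)
def confAt (d : Nat) (a u : Int) : Int :=
  (if a = u then 1 else 0) + (if (a - u).natAbs = d then 1 else 0)

lemma getD_app_left (l l' : List Int) (n : Nat) (h : n < l.length) :
    (l ++ l').getD n 0 = l.getD n 0 := by
  simp [List.getD, List.getElem?_append_left h]

lemma getD_app_right (l l' : List Int) (n : Nat) (h : l.length ≤ n) :
    (l ++ l').getD n 0 = l'.getD (n - l.length) 0 := by
  simp [List.getD, List.getElem?_append_right h]

lemma getD_succ (a : Int) (t : List Int) (n : Nat) : (a :: t).getD (n + 1) 0 = t.getD n 0 := by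
  simp [List.getD]

lemma confAt_comm (d : Nat) (a u : Int) : confAt d a u = confAt d u a := by
  unfold confAt
  have h1 : (a = u) ↔ (u = a) := eq_comm
  have h2 : (a - u).natAbs = (u - a).natAbs := by omega
  rw [h2]
  by_cases h : u = a <;> simp [h, h1]

-- conflicts of z with the elements of t, t starting one column to z's right
def crossH (z : Int) (t : List Int) : Int :=
  ((List.range t.length).map (fun m => confAt (m + 1) z (t.getD m 0))).sum

-- total pair conflict count, structurally
def Hc : List Int → Int
  | [] => 0
  | a :: t => crossH a t + Hc t

-- conflicts of z with the elements of q, q ending one column to z's left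
def Gpre (z : Int) : List Int → Int
  | [] => 0
  | a :: q => confAt (q.length + 1) a z + Gpre z q

-- ---- A side: get_h_cost = Hc ----

-- the value one (i,j) pair adds inside A's double loop
def tA (b : List Int) (i j : Int) : Int :=
  (if PySem.List.pyGetD b i 0 = PySem.List.pyGetD b j 0 then 1 else 0) +
  (if PySem.List.pyGetD b i 0 = PySem.List.pyGetD b j 0 - (j - i) ∨
      PySem.List.pyGetD b i 0 = PySem.List.pyGetD b j 0 + (j - i) then 1 else 0)

lemma foldl_inner_A (b : List Int) (i : Int) (js : List Int) (h : Int) :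
    js.foldl (fun h j =>
      let bi := PySem.List.pyGetD b i 0
      let bj := PySem.List.pyGetD b j 0
      let h1 := if bi == bj then h + 1 else h
      let offset := j - i
      if bi == bj - offset || bi == bj + offset then h1 + 1 else h1) h
    = h + (js.map (tA b i)).sum := by
  induction js generalizing h with
  | nil => simp
  | cons j js ih =>
    simp only [List.foldl_cons, List.map_cons, List.sum_cons, ih, tA]
    split_ifs <;> simp_all <;> ring

lemma get_h_cost_eq_sum (b : List Int) :
    get_h_cost b = ((PySem.List.pyRange 0 (PySem.List.len b) 1).map (fun i =>
      ((PySem.List.pyRange (i + 1) (PySem.List.len b) 1).map (tA b i)).sum)).sum := by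
  unfold get_h_cost
  rw [show (fun (h i : Int) =>
        (PySem.List.pyRange (i + 1) (PySem.List.len b) 1).foldl (fun h j =>
          let bi := PySem.List.pyGetD b i 0
          let bj := PySem.List.pyGetD b j 0
          let h1 := if bi == bj then h + 1 else h
          let offset := j - i
          if bi == bj - offset || bi == bj + offset then h1 + 1 else h1) h)
      = (fun (h i : Int) => h +
          ((PySem.List.pyRange (i + 1) (PySem.List.len b) 1).map (tA b i)).sum) from
    funext fun h => funext fun i => foldl_inner_A b i _ h]
  rw [PySem.List.foldl_add]
  ring

-- double sum over Nat indices
def SS (b : List Int) : Int :=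
  ((List.range b.length).map (fun i =>
    ((List.range (b.length - i - 1)).map (fun m =>
      confAt (m + 1) (b.getD i 0) (b.getD (i + 1 + m) 0))).sum)).sum

lemma tA_eq_confAt (b : List Int) (i m : Nat) :
    tA b (i : Int) ((i : Int) + 1 + (m : Int)) =
      confAt (m + 1) (b.getD i 0) (b.getD (i + 1 + m) 0) := by
  unfold tA confAt
  have h1 : ((i : Int) + 1 + (m : Int)) = ((i + 1 + m : Nat) : Int) := by push_cast; ring
  rw [h1, PySem.List.pyGetD_natCast, PySem.List.pyGetD_natCast]
  have h2 : ((i + 1 + m : Nat) : Int) - (i : Int) = ((m + 1 : Nat) : Int) := by push_cast; ring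
  rw [h2]
  congr 1
  split_ifs <;> omega

lemma get_h_cost_eq_SS (b : List Int) : get_h_cost b = SS b := by
  rw [get_h_cost_eq_sum, SS]
  rw [PySem.List.len_eq, PySem.List.pyRange_one]
  simp only [Int.sub_zero, Int.toNat_natCast, List.map_map]
  apply congrArg
  apply List.map_congr_left
  intro i hi
  rw [List.mem_range] at hi
  simp only [Function.comp_apply, zero_add]
  rw [PySem.List.pyRange_one]
  have harg : ((b.length : Int) - ((i : Int) + 1)).toNat = b.length - i - 1 := by omega
  rw [harg]
  simp only [List.map_map]
  apply congrArg
  apply List.map_congr_left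
  intro m hm
  simp only [Function.comp_apply]
  exact tA_eq_confAt b i m

lemma SS_eq_Hc (b : List Int) : SS b = Hc b := by
  induction b with
  | nil => simp [SS, Hc]
  | cons a t ih =>
    rw [Hc, ← ih]
    unfold SS
    have hlen : (a :: t).length = t.length + 1 := rfl
    rw [hlen, List.range_succ_eq_map]
    simp only [List.map_cons, List.sum_cons, List.map_map]
    congr 1
    · -- head: i = 0
      unfold crossH
      have h0 : t.length + 1 - 0 - 1 = t.length := by omega
      rw [h0]
      apply congrArg
      apply List.map_congr_left
      intro m _
      rw [show 0 + 1 + m = m + 1 by omega, getD_succ]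
      rfl
    · -- tail: i = k + 1
      apply congrArg
      apply List.map_congr_left
      intro k _
      simp only [Function.comp_apply]
      have h1 : t.length + 1 - (k + 1) - 1 = t.length - k - 1 := by omega
      rw [show Nat.succ k = k + 1 from rfl] at *
      rw [h1]
      apply congrArg
      apply List.map_congr_left
      intro m _
      have e1 : (a :: t).getD (k + 1) 0 = t.getD k 0 := getD_succ a t k
      have e2 : (a :: t).getD (k + 1 + 1 + m) 0 = t.getD (k + 1 + m) 0 := by
        rw [show k + 1 + 1 + m = (k + 1 + m) + 1 by omega, getD_succ]
      rw [e1, e2]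

-- crossH across a split list: the middle element appears once, at distance q.length + 1
lemma crossH_append_cons (z : Int) (q : List Int) (x : Int) (s : List Int) :
    crossH z (q ++ x :: s) = crossH z q + confAt (q.length + 1) z x +
      ((List.range s.length).map (fun m =>
        confAt (q.length + 1 + (m + 1)) z (s.getD m 0))).sum := by
  unfold crossH
  have hlen : (q ++ x :: s).length = q.length + (s.length + 1) := by
    rw [List.length_append, List.length_cons]
  rw [hlen, List.range_add, List.range_succ_eq_map]
  simp only [List.map_append, List.sum_append, List.map_cons, List.sum_cons, List.map_map,
    Function.comp_def, Nat.succ_eq_add_one]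
  have hq : ∀ m ∈ List.range q.length,
      confAt (m + 1) z ((q ++ x :: s).getD m 0) = confAt (m + 1) z (q.getD m 0) := by
    intro m hm
    rw [List.mem_range] at hm
    rw [getD_app_left _ _ _ hm]
  rw [List.map_congr_left hq]
  have hmid : (q ++ x :: s).getD (q.length + 0) 0 = x := by
    rw [Nat.add_zero, getD_app_right _ _ _ (le_refl q.length)]
    simp
  have hs : ∀ m ∈ List.range s.length,
      confAt (q.length + (m + 1) + 1) z ((q ++ x :: s).getD (q.length + (m + 1)) 0) =
        confAt (q.length + 1 + (m + 1)) z (s.getD m 0) := by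
    intro m hm
    have hge : q.length ≤ q.length + (m + 1) := by omega
    rw [getD_app_right _ _ _ hge]
    have : q.length + (m + 1) - q.length = m + 1 := by omega
    rw [this, getD_succ]
    congr 1
    omega
  rw [List.map_congr_left hs, hmid]
  simp only [Nat.add_zero]
  ring

-- the move delta: replacing the middle element changes Hc by its own conflict counts only
lemma Hc_delta (q s : List Int) (x y : Int) :
    Hc (q ++ x :: s) + Gpre y q + crossH y s =
      Hc (q ++ y :: s) + Gpre x q + crossH x s := by
  induction q with
  | nil =>
    simp only [List.nil_append, Hc, Gpre]
    ring
  | cons a q ih =>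
    simp only [List.cons_append, Hc, Gpre]
    rw [crossH_append_cons a q x s, crossH_append_cons a q y s]
    have := ih
    omega

-- ---- B side: conflicts = Gpre + crossH ----

def tB (b : List Int) (col x j : Int) : Int :=
  if j = col then 0
  else confAt (j - col).natAbs (PySem.List.pyGetD b j 0) x

lemma foldl_inner_B (b : List Int) (col x : Int) (js : List Int) (c : Int) :
    js.foldl (fun c j =>
      if j == col then c
      else
        let u := PySem.List.pyGetD b j 0
        let c1 := if u == x then c + 1 else c
        let d := |j - col|
        if |u - x| == d then c1 + 1 else c1) c
    = c + (js.map (tB b col x)).sum := by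
  induction js generalizing c with
  | nil => simp
  | cons j js ih =>
    simp only [List.foldl_cons, List.map_cons, List.sum_cons]
    rw [ih]
    have hb : (if (j == col) = true then c
        else
          let u := PySem.List.pyGetD b j 0
          let c1 := if (u == x) = true then c + 1 else c
          let d := |j - col|
          if (|u - x| == d) = true then c1 + 1 else c1) = c + tB b col x j := by
      by_cases h1 : j = col
      · simp [h1, tB]
      · rw [if_neg (by simpa using h1)]
        unfold tB confAt
        rw [if_neg h1]
        set u := PySem.List.pyGetD b j 0 with hu
        have habs : ((u - x).natAbs = (j - col).natAbs) ↔ |u - x| = |j - col| := by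
          rw [Int.abs_eq_natAbs, Int.abs_eq_natAbs, Nat.cast_inj]
        have hjc : (0 : Int) < |j - col| := abs_pos.mpr (sub_ne_zero.mpr h1)
        have hne : ¬ ((0 : Int) = |j - col|) := by omega
        simp only [beq_iff_eq, habs]
        by_cases h2 : u = x <;> by_cases h3 : |u - x| = |j - col| <;>
          simp [h2, h3, hne]
    rw [hb]
    ring

lemma conflicts_eq_sum (b : List Int) (col x : Int) :
    conflicts b col x =
      ((List.range b.length).map (fun j : Nat => tB b col x (j : Int))).sum := by
  unfold conflicts
  rw [foldl_inner_B]
  rw [PySem.List.len_eq, PySem.List.pyRange_one]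
  simp only [Int.sub_zero, Int.toNat_natCast, List.map_map, Function.comp_def, zero_add]

lemma Gpre_eq_sum (x : Int) (q : List Int) :
    Gpre x q = ((List.range q.length).map (fun k =>
      confAt (q.length - k) (q.getD k 0) x)).sum := by
  induction q with
  | nil => simp [Gpre]
  | cons a p ih =>
    rw [Gpre, ih]
    have hlen : (a :: p).length = p.length + 1 := rfl
    rw [hlen, List.range_succ_eq_map]
    simp only [List.map_cons, List.sum_cons, List.map_map, Function.comp_def,
      Nat.succ_eq_add_one]
    have hbody : ∀ k ∈ List.range p.length,
        confAt (p.length + 1 - (k + 1)) ((a :: p).getD (k + 1) 0) x =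
          confAt (p.length - k) (p.getD k 0) x := by
      intro k _
      have h1 : p.length + 1 - (k + 1) = p.length - k := by omega
      rw [h1]
      simp [List.getD]
    rw [List.map_congr_left hbody]
    simp [List.getD]

lemma conflicts_split (q : List Int) (v : Int) (s : List Int) (x : Int) :
    conflicts (q ++ v :: s) ((q.length : Int)) x = Gpre x q + crossH x s := by
  rw [conflicts_eq_sum, Gpre_eq_sum]
  unfold crossH
  have hlen : (q ++ v :: s).length = q.length + (s.length + 1) := by
    rw [List.length_append, List.length_cons]
  rw [hlen, List.range_add, List.range_succ_eq_map]
  simp only [List.map_append, List.sum_append, List.map_cons, List.sum_cons, List.map_map,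
    Function.comp_def, Nat.succ_eq_add_one]
  have hq : ∀ k ∈ List.range q.length,
      tB (q ++ v :: s) ((q.length : Int)) x ((k : Nat) : Int) =
        confAt (q.length - k) (q.getD k 0) x := by
    intro k hk
    rw [List.mem_range] at hk
    unfold tB
    have hne : ((k : Nat) : Int) ≠ (q.length : Int) := by omega
    rw [if_neg hne]
    have habs : (((k : Nat) : Int) - (q.length : Int)).natAbs = q.length - k := by omega
    rw [habs, PySem.List.pyGetD_natCast, getD_app_left _ _ _ hk]
  have hmid : tB (q ++ v :: s) ((q.length : Int)) x (((q.length + 0 : Nat)) : Int) = 0 := by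
    unfold tB
    simp
  have hs : ∀ m ∈ List.range s.length,
      tB (q ++ v :: s) ((q.length : Int)) x (((q.length + (m + 1) : Nat)) : Int) =
        confAt (m + 1) x (s.getD m 0) := by
    intro m hm
    unfold tB
    have hne : (((q.length + (m + 1) : Nat)) : Int) ≠ (q.length : Int) := by
      push_cast; omega
    rw [if_neg hne]
    have habs : ((((q.length + (m + 1) : Nat)) : Int) - (q.length : Int)).natAbs = m + 1 := by
      push_cast; omega
    rw [habs, PySem.List.pyGetD_natCast]
    have hge : q.length ≤ q.length + (m + 1) := by omega
    rw [getD_app_right _ _ _ hge]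
    have h2 : q.length + (m + 1) - q.length = m + 1 := by omega
    rw [h2, getD_succ]
    exact confAt_comm (m + 1) (s.getD m 0) x
  rw [List.map_congr_left hq, List.map_congr_left hs, hmid]
  ring

-- ---- the per-move comparison ----

lemma pair_iff (q s : List Int) (v r : Int) :
    (get_h_cost (PySem.List.pySetD (q ++ v :: s) ((q.length : Int)) r) <
        get_h_cost (q ++ v :: s)) ↔
      (conflicts (q ++ v :: s) ((q.length : Int)) r <
        conflicts (q ++ v :: s) ((q.length : Int)) v) := by
  have hset : PySem.List.pySetD (q ++ v :: s) ((q.length : Int)) r = q ++ r :: s := by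
    rw [PySem.List.pySetD_natCast]
    induction q with
    | nil => simp
    | cons a p ih => simp only [List.cons_append, List.length_cons, List.set_cons_succ, ih]
  rw [hset, get_h_cost_eq_SS, get_h_cost_eq_SS, SS_eq_Hc, SS_eq_Hc,
      conflicts_split, conflicts_split]
  have := Hc_delta q s r v
  omega

-- ---- the loops ----

lemma getD_mid (q : List Int) (v : Int) (s : List Int) :
    PySem.List.pyGetD (q ++ v :: s) ((q.length : Int)) 0 = v := by
  rw [PySem.List.pyGetD_natCast, getD_app_right _ _ _ (le_refl q.length)]
  simp

lemma rows_eq (q s : List Int) (v : Int) (rows : List Int) :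
    make_gready_rows (q ++ v :: s) (get_h_cost (q ++ v :: s)) ((q.length : Int)) rows =
      make_gready_alt_rows (q ++ v :: s) ((q.length : Int)) v
        (conflicts (q ++ v :: s) ((q.length : Int)) v) rows := by
  induction rows with
  | nil => rfl
  | cons row rows ih =>
    simp only [make_gready_rows, make_gready_alt_rows, getD_mid]
    by_cases hg : v = row
    · have hgt : (v == row) = true := by simp [hg]
      rw [if_pos hgt, if_pos hgt]
      exact ih
    · have hgf : ¬ ((v == row) = true) := by simp [hg]
      rw [if_neg hgf, if_neg hgf]
      by_cases hc : conflicts (q ++ v :: s) ((q.length : Int)) row <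
          conflicts (q ++ v :: s) ((q.length : Int)) v
      · rw [if_pos ((pair_iff q s v row).mpr hc), if_pos hc]
      · rw [if_neg (fun h => hc ((pair_iff q s v row).mp h)), if_neg hc]
        exact ih

lemma cols_eq (b : List Int) (cols : List Int)
    (hb : ∀ col ∈ cols, 0 ≤ col ∧ col < (b.length : Int)) :
    make_gready_cols b (get_h_cost b) cols = make_gready_alt_cols b cols := by
  induction cols with
  | nil => rfl
  | cons col cols ih =>
    obtain ⟨h0, hlt⟩ := hb col (List.mem_cons_self ..)
    -- decompose b around position col
    have hk : col.toNat < b.length := by omega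
    have hex : ∃ q v s, b = q ++ v :: s ∧ ((q.length : Int)) = col := by
      refine ⟨b.take col.toNat, b[col.toNat], b.drop (col.toNat + 1), ?_, ?_⟩
      · conv_lhs => rw [← List.take_append_drop col.toNat b]
        rw [List.drop_eq_getElem_cons hk]
      · rw [List.length_take]
        omega
    obtain ⟨q, v, s, rfl, hcol⟩ := hex
    rw [make_gready_cols, make_gready_alt_cols, ← hcol, getD_mid, rows_eq]
    cases make_gready_alt_rows (q ++ v :: s) ((q.length : Int)) v
        (conflicts (q ++ v :: s) ((q.length : Int)) v)
        (PySem.List.pyRange 0 (PySem.List.len (q ++ v :: s)) 1) with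
    | none =>
      simp only
      exact ih (fun c hc => hb c (List.mem_cons_of_mem _ hc))
    | some r => simp only

-- ===== VERDICT (by name: the statement is the Claim_ definition above) =====
theorem make_gready_spec : Claim_equal_make_gready := by
  intro board _
  unfold Spec_make_gready make_gready make_gready_alt
  apply cols_eq
  intro col hcol
  rw [PySem.List.len_eq] at hcol
  rw [PySem.List.mem_pyRange_one] at hcol
  exact hcol
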